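-- pv_equiv track=rewrite | github.com/lcmrl/multicamera-calibration | src/cct_calibration/run.py | normalize_target_id
-- ===== SOURCE A (Python) =====
-- from typing import Dict, List, Sequence, Set
--
-- def normalize_target_id(raw_id: int, valid_ids: Set[int] | None, max_hamming_distance: int) -> tuple[int | None, bool]:
--     if valid_ids is None:
--         return raw_id, False
--     if raw_id in valid_ids:
--         return raw_id, False
--
--     best_id: int | None = None
--     best_distance: int | None = None
--     is_ambiguous = False
--     for candidate in valid_ids:
--         distance = (raw_id ^ candidate).bit_count()
--         if best_distance is None or distance < best_distance:
--             best_id = candidate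
--             best_distance = distance
--             is_ambiguous = False
--         elif distance == best_distance:
--             is_ambiguous = True
--
--     if best_id is None or best_distance is None or is_ambiguous or best_distance > max_hamming_distance:
--         return None, False
--     return best_id, True
-- ===== SOURCE B (Python) =====
-- def normalize_target_id(raw_id, valid_ids, max_hamming_distance):
--     if valid_ids is None:
--         return raw_id, False
--     if raw_id in valid_ids:
--         return raw_id, False
--     distances = [(raw_id ^ c).bit_count() for c in valid_ids]
--     if not distances:
--         return None, False
--     m = min(distances)
--     winners = [c for c in valid_ids if (raw_id ^ c).bit_count() == m]
--     if len(winners) == 1 and m <= max_hamming_distance: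
--         return winners[0], True
--     return None, False
-- ===== Notes on version B (the rewrite author's own statement) =====
-- stated objective: alternative
-- what changed: A's single pass maintaining a running best candidate, running best distance and an ambiguity flag is replaced by a min-then-tie-count decomposition: compute the list of Hamming distances, take its minimum, collect the candidates attaining it, and accept only a unique winner within max_hamming_distance.
import Mathlib
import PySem

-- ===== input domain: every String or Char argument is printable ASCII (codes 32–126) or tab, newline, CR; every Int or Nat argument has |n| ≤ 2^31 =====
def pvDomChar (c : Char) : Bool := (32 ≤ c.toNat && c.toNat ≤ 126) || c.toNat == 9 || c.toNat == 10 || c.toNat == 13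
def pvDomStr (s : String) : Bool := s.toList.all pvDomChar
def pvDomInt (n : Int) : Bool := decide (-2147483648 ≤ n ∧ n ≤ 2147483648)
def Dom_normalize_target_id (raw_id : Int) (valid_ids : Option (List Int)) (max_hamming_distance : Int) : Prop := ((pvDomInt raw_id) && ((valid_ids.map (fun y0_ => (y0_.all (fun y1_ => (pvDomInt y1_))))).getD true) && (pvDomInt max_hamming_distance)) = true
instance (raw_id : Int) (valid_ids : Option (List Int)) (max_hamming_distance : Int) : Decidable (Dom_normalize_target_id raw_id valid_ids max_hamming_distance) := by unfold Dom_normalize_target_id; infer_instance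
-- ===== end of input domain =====

-- B replaces A's running-best/ambiguity-flag accumulator by a min-then-tie-count
-- reduction (compute all distances, take the minimum, keep the winners attaining it);
-- objective: alternative decomposition, same cost.

-- ===== PORT A =====
-- shared helper: (raw_id ^ candidate).bit_count()
def pvDist (raw_id c : Int) : Nat := PySem.Int.bitCount (PySem.Int.bxor raw_id c)

-- the body of A's for-loop, as a fold step over (best_id, best_distance, is_ambiguous)
def pvStepA (raw_id : Int) (st : Option Int × Option Nat × Bool) (candidate : Int) :
    Option Int × Option Nat × Bool :=
  let d := pvDist raw_id candidate
  match st with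
  | (_, none, _) => (some candidate, some d, false)
  | (bid, some bd, amb) =>
    if d < bd then (some candidate, some d, false)
    else if d = bd then (bid, some bd, true)
    else (bid, some bd, amb)

def normalize_target_id (raw_id : Int) (valid_ids : Option (List Int)) (max_hamming_distance : Int) : Option Int × Bool :=
  match valid_ids with
  | none => (some raw_id, false)
  | some vs =>
    if vs.contains raw_id then (some raw_id, false)
    else
      match vs.foldl (pvStepA raw_id) (none, none, false) with
      | (some bid, some bd, amb) =>
        if amb || decide (max_hamming_distance < (bd : Int)) then (none, false)
        else (some bid, true)
      | _ => (none, false)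

-- ===== PORT B =====
def normalize_target_id_alt (raw_id : Int) (valid_ids : Option (List Int)) (max_hamming_distance : Int) : Option Int × Bool :=
  match valid_ids with
  | none => (some raw_id, false)
  | some vs =>
    if vs.contains raw_id then (some raw_id, false)
    else
      let distances := vs.map (fun c => pvDist raw_id c)
      match distances with
      | [] => (none, false)
      | d :: rest =>
        let m := rest.foldl min d           -- min(distances)
        let winners := vs.filter (fun c => pvDist raw_id c == m)
        match winners with
        | [w] => if (m : Int) ≤ max_hamming_distance then (some w, true) else (none, false)
        | _ => (none, false)

-- ===== PRECONDITION & SPEC =====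
def Spec_normalize_target_id (raw_id : Int) (valid_ids : Option (List Int)) (max_hamming_distance : Int) (out : Option Int × Bool) : Prop := out = normalize_target_id_alt raw_id valid_ids max_hamming_distance
instance (raw_id : Int) (valid_ids : Option (List Int)) (max_hamming_distance : Int) (out : Option Int × Bool) : Decidable (Spec_normalize_target_id raw_id valid_ids max_hamming_distance out) := by unfold Spec_normalize_target_id; infer_instance

-- ===== CLAIM (what is proved, stated in full; the proofs are below) =====
def Claim_equal_normalize_target_id : Prop := ∀ (raw_id : Int) (valid_ids : Option (List Int)) (max_hamming_distance : Int), Dom_normalize_target_id raw_id valid_ids max_hamming_distance → Spec_normalize_target_id raw_id valid_ids max_hamming_distance (normalize_target_id raw_id valid_ids max_hamming_distance)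

-- ===== LEMMAS AND PROOFS =====

-- the minimum of `bd` and the distances of the elements of `l`
def pvMin (r : Int) : Nat → List Int → Nat
  | bd, [] => bd
  | bd, c :: t => pvMin r (min bd (pvDist r c)) t

lemma pvMin_cons (r : Int) (bd : Nat) (c : Int) (t : List Int) :
    pvMin r bd (c :: t) = pvMin r (min bd (pvDist r c)) t := rfl

lemma pvMin_le (r : Int) (l : List Int) : ∀ bd : Nat, pvMin r bd l ≤ bd := by
  induction l with
  | nil => intro bd; simp [pvMin]
  | cons c t ih =>
    intro bd
    have h1 := ih (min bd (pvDist r c))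
    have h2 := Nat.min_le_left bd (pvDist r c)
    rw [pvMin_cons]
    omega

lemma pvMin_eq_foldl (r : Int) (l : List Int) :
    ∀ bd : Nat, (l.map (fun c => pvDist r c)).foldl min bd = pvMin r bd l := by
  induction l with
  | nil => intro bd; simp [pvMin]
  | cons c t ih => intro bd; rw [List.map_cons, List.foldl_cons, pvMin_cons, ih]

lemma pvMin_attained (r : Int) (l : List Int) :
    ∀ bd : Nat, pvMin r bd l ≠ bd →
      ∃ x, l.find? (fun c => pvDist r c == pvMin r bd l) = some x ∧ pvDist r x = pvMin r bd l := by
  induction l with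
  | nil => intro bd h; simp [pvMin] at h
  | cons c t ih =>
    intro bd h
    by_cases hc : pvDist r c = pvMin r bd (c :: t)
    · exact ⟨c, List.find?_cons_of_pos (by simp [hc]), hc⟩
    · rw [pvMin_cons] at h hc ⊢
      have hle := pvMin_le r t (min bd (pvDist r c))
      have hne : pvMin r (min bd (pvDist r c)) t ≠ min bd (pvDist r c) := by
        intro he
        rcases Nat.le_total bd (pvDist r c) with hh | hh
        · exact h (by omega)
        · exact hc (by omega)
      obtain ⟨x, hx, hxd⟩ := ih (min bd (pvDist r c)) hne
      exact ⟨x, by rw [List.find?_cons_of_neg (by simp [hc])]; exact hx, hxd⟩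

-- a closed characterisation of A's fold starting from an already-set best
lemma foldA_char (r : Int) (l : List Int) :
    ∀ (b : Int) (bd : Nat) (amb : Bool),
      List.foldl (pvStepA r) (some b, some bd, amb) l =
        (some (if pvMin r bd l = bd then b
               else (l.find? (fun c => pvDist r c == pvMin r bd l)).getD b),
         some (pvMin r bd l),
         (decide (2 ≤ l.countP (fun c => pvDist r c == pvMin r bd l)
                    + (if pvMin r bd l = bd then 1 else 0))
          || (amb && decide (pvMin r bd l = bd)))) := by
  induction l with
  | nil => intro b bd amb; simp [pvMin]
  | cons c t ih =>
    intro b bd amb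
    rcases Nat.lt_trichotomy (pvDist r c) bd with hlt | heq | hgt
    · -- pvDist r c < bd : best reset to (c, pvDist r c, false)
      have hstep : pvStepA r (some b, some bd, amb) c
          = (some c, some (pvDist r c), false) := by
        simp [pvStepA, hlt]
      rw [List.foldl_cons, hstep, ih c (pvDist r c) false, pvMin_cons,
        (by omega : min bd (pvDist r c) = pvDist r c)]
      have hle' := pvMin_le r t (pvDist r c)
      have hMne : pvMin r (pvDist r c) t ≠ bd := by omega
      by_cases hdm : pvMin r (pvDist r c) t = pvDist r c
      · -- head attains the minimum
        have hfind : (c :: t).find? (fun x => pvDist r x == pvMin r (pvDist r c) t)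
            = some c := List.find?_cons_of_pos (by simp [hdm])
        have hcnt : (c :: t).countP (fun x => pvDist r x == pvMin r (pvDist r c) t)
            = t.countP (fun x => pvDist r x == pvMin r (pvDist r c) t) + 1 := by
          simp [hdm]
        rw [if_neg hMne, hfind, hcnt, if_pos hdm, Option.getD_some]
        refine congrArg₂ Prod.mk rfl (congrArg₂ Prod.mk rfl ?_)
        simp only [decide_eq_false hMne, Bool.and_false, Bool.false_and,
          Bool.or_false, if_neg hMne, if_pos hdm]
      · -- head does not attain the minimum
        obtain ⟨x, hx, _⟩ := pvMin_attained r t (pvDist r c) hdm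
        have hfind : (c :: t).find? (fun y => pvDist r y == pvMin r (pvDist r c) t)
            = t.find? (fun y => pvDist r y == pvMin r (pvDist r c) t) :=
          List.find?_cons_of_neg (by simp only [beq_iff_eq]; omega)
        have hcnt : (c :: t).countP (fun y => pvDist r y == pvMin r (pvDist r c) t)
            = t.countP (fun y => pvDist r y == pvMin r (pvDist r c) t) := by
          simp only [List.countP_cons]
          have hh : ¬ ((pvDist r c == pvMin r (pvDist r c) t) = true) := by
            simp only [beq_iff_eq]; omega
          simp [hh]
        rw [if_neg hMne, if_neg hdm, hfind, hcnt, hx]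
        refine congrArg₂ Prod.mk rfl (congrArg₂ Prod.mk rfl ?_)
        simp only [decide_eq_false hMne, Bool.and_false, Bool.false_and,
          Bool.or_false, if_neg hMne, if_neg hdm]
    · -- pvDist r c = bd : ambiguity set, best kept
      have hstep : pvStepA r (some b, some bd, amb) c = (some b, some bd, true) := by
        simp [pvStepA, heq]
      rw [List.foldl_cons, hstep, ih b bd true, pvMin_cons,
        (by omega : min bd (pvDist r c) = bd)]
      have hle' := pvMin_le r t bd
      by_cases hbd : pvMin r bd t = bd
      · -- minimum equals bd: ambiguous for sure
        have hcnt : (c :: t).countP (fun y => pvDist r y == pvMin r bd t)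
            = t.countP (fun y => pvDist r y == pvMin r bd t) + 1 := by
          simp [heq, hbd]
        simp only [if_pos hbd]
        rw [hcnt]
        refine congrArg₂ Prod.mk rfl (congrArg₂ Prod.mk rfl ?_)
        rw [decide_eq_true hbd]
        have h2 : decide (2 ≤ List.countP (fun y => pvDist r y == pvMin r bd t) t + 1 + 1)
            = true := by rw [decide_eq_true_eq]; omega
        rw [h2]
        simp
      · have hccond : ¬ ((pvDist r c == pvMin r bd t) = true) := by
          simp only [beq_iff_eq]; rw [heq]; exact fun hh => hbd hh.symm
        have hfind : (c :: t).find? (fun y => pvDist r y == pvMin r bd t)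
            = t.find? (fun y => pvDist r y == pvMin r bd t) :=
          List.find?_cons_of_neg hccond
        have hcnt : (c :: t).countP (fun y => pvDist r y == pvMin r bd t)
            = t.countP (fun y => pvDist r y == pvMin r bd t) := by
          simp only [List.countP_cons]
          simp [hccond]
        simp only [if_neg hbd]
        rw [hfind, hcnt]
        refine congrArg₂ Prod.mk rfl (congrArg₂ Prod.mk rfl ?_)
        simp only [decide_eq_false hbd, Bool.and_false, Bool.or_false]
    · -- pvDist r c > bd : state unchanged
      have hstep : pvStepA r (some b, some bd, amb) c = (some b, some bd, amb) := by
        simp [pvStepA, show ¬ pvDist r c < bd by omega, show ¬ pvDist r c = bd by omega]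
      rw [List.foldl_cons, hstep, ih b bd amb, pvMin_cons,
        (by omega : min bd (pvDist r c) = bd)]
      have hle' := pvMin_le r t bd
      have hfind : (c :: t).find? (fun y => pvDist r y == pvMin r bd t)
          = t.find? (fun y => pvDist r y == pvMin r bd t) :=
        List.find?_cons_of_neg (by simp only [beq_iff_eq]; omega)
      have hcnt : (c :: t).countP (fun y => pvDist r y == pvMin r bd t)
          = t.countP (fun y => pvDist r y == pvMin r bd t) := by
        simp only [List.countP_cons]
        have hh : ¬ ((pvDist r c == pvMin r bd t) = true) := by
          simp only [beq_iff_eq]; omega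
        simp [hh]
      rw [hfind, hcnt]

-- ===== VERDICT (by name: the statement is the Claim_ definition above) =====
theorem normalize_target_id_spec : Claim_equal_normalize_target_id := by
  intro r vids maxh _
  unfold Spec_normalize_target_id normalize_target_id normalize_target_id_alt
  cases vids with
  | none => rfl
  | some vs =>
    by_cases hin : r ∈ vs
    · simp [hin]
    · have hin' : vs.contains r = false := by simpa using hin
      simp only [hin', Bool.false_eq_true, if_false]
      cases vs with
      | nil => rfl
      | cons c t =>
        simp only [List.map_cons, List.foldl_cons, pvMin_eq_foldl]
        have hfirst : pvStepA r (none, none, false) c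
            = (some c, some (pvDist r c), false) := rfl
        rw [hfirst, foldA_char r t c (pvDist r c) false]
        have hle := pvMin_le r t (pvDist r c)
        set M := pvMin r (pvDist r c) t with hM
        set p : Int → Bool := fun y => pvDist r y == M with hp
        have hk : ((c :: t).filter p).length = t.countP p + (if M = pvDist r c then 1 else 0) := by
          rw [← List.countP_eq_length_filter]
          simp only [List.countP_cons, hp]
          by_cases h : M = pvDist r c
          · simp [h]
          · have : ¬ ((pvDist r c == M) = true) := by simp; intro he; exact h he.symm
            simp [this, h]
        have hk1 : 1 ≤ t.countP p + (if M = pvDist r c then 1 else 0) := by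
          by_cases h : M = pvDist r c
          · simp [h]
          · obtain ⟨x, hx, hxd⟩ := pvMin_attained r t (pvDist r c) (by rw [← hM]; omega)
            have hmem := List.mem_of_find?_eq_some hx
            have hxf : x ∈ t.filter p := List.mem_filter.2 ⟨hmem, by simp [hp, hxd, hM]⟩
            have hpos : 0 < t.countP p := by
              rw [List.countP_eq_length_filter]
              exact List.length_pos_of_mem hxf
            omega
        rcases hw : (c :: t).filter p with _ | ⟨w, _ | ⟨w2, ws⟩⟩
        · rw [hw] at hk; simp at hk; omega
        · -- exactly one winner
          have hkeq : t.countP p + (if M = pvDist r c then 1 else 0) = 1 := by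
            rw [hw] at hk; simpa using hk.symm
          have hamb : ¬ (2 ≤ t.countP p + (if M = pvDist r c then 1 else 0)) := by omega
          have hhead : some w = (c :: t).find? p := by
            rw [← List.head?_filter, hw]; rfl
          have hbw : (if M = pvDist r c then c
              else ((t.find? p).getD c)) = w := by
            by_cases h : M = pvDist r c
            · rw [if_pos h]
              rw [List.find?_cons_of_pos (by simp [hp, h])] at hhead
              exact (Option.some_inj.1 hhead).symm
            · rw [if_neg h]
              rw [List.find?_cons_of_neg (by simp [hp]; intro he; exact h he.symm)] at hhead
              obtain ⟨x, hx, _⟩ := pvMin_attained r t (pvDist r c) (by rw [← hM]; omega)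
              rw [← hM, ← hp] at hx
              rw [hx] at hhead ⊢
              simpa using hhead.symm
          simp only [decide_eq_false hamb, Bool.false_or, hbw]
          by_cases hmx : (M : Int) ≤ maxh
          · have hlt' : ¬ (maxh < (M : Int)) := by omega
            simp [hlt', hmx]
          · have hlt' : maxh < (M : Int) := by omega
            simp [hlt', hmx]
        · -- two or more winners: ambiguous on the A side, multi-match on the B side
          have hk2 : 2 ≤ t.countP p + (if M = pvDist r c then 1 else 0) := by
            rw [hw] at hk; simp at hk; omega
          simp [hk2]
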